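-- pv_equiv track=rewrite | github.com/Deadbeastrs/Cybersecurity-1-year | IAA/Projeto_IAA_oauth/website/game_logic.py | combineChars
-- ===== SOURCE A (Python) =====
-- def combineChars(chars, spacing):
--     lines = []
--     for line_i in range(max([len(x) for x in chars])):
--         line = []
--         for char in chars:
--             if len(char) > line_i:
--                 line.append(char[line_i])
--         lines.append(spacing.join(line))
--     return '\n'.join(lines)
-- ===== SOURCE B (Python) =====
-- def combineChars(chars, spacing):
--     lines = []
--     its = [iter(c) for c in chars]
--     _END = object()
--     while True:
--         row = [ch for ch in (next(it, _END) for it in its) if ch is not _END]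
--         if not row:
--             break
--         lines.append(spacing.join(row))
--     return '\n'.join(lines)
-- ===== Notes on version B (the rewrite author's own statement) =====
-- stated objective: alternative
-- what changed: B transposes by lockstep consumption: one iterator per grid, each round takes one next() from every iterator (sentinel for exhausted grids dropped) and stops when a round yields nothing, instead of computing the maximum length and indexing every grid with a length guard per row index; Pre_ excludes chars == [], where A raises ValueError (max of an empty sequence).
import Mathlib
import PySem

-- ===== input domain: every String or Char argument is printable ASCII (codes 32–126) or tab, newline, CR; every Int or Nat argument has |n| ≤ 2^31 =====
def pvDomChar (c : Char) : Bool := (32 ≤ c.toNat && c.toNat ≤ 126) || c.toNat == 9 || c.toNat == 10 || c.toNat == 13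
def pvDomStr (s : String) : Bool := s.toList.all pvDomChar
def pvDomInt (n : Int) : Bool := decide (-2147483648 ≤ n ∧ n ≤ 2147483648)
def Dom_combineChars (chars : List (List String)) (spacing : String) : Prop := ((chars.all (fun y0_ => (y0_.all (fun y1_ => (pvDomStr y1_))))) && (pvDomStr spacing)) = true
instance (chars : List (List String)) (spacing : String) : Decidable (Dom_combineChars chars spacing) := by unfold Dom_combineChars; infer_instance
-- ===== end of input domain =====

-- B transposes by lockstep head/tail peeling of the grids instead of max-length indexing (alternative decomposition, same cost); Pre_ excludes chars = [], where the Python A raises ValueError.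


-- ===== PORT A =====
def combineChars (chars : List (List String)) (spacing : String) : String :=
  let n := ((chars.map (fun x => x.length)).max?).getD 0
  let lines := (List.range n).foldl (fun lines line_i =>
    let line := chars.foldl (fun line c =>
      if c.length > line_i then line ++ [c.getD line_i ""] else line) []
    lines ++ [PySem.Str.join spacing line]) []
  PySem.Str.join "\n" lines

-- ===== PORT B =====
-- termination helper for the peeling loop (cited by decreasing_by)
theorem pvTailSum_le (rest : List (List String)) :
    ((rest.map List.tail).map List.length).sum ≤ (rest.map List.length).sum := by
  induction rest with
  | nil => simp
  | cons a t ih =>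
    have : a.tail.length ≤ a.length := by cases a <;> simp
    simp only [List.map_cons, List.sum_cons]; omega

theorem pvTailSum_lt (rest : List (List String))
    (h : rest.any (fun c => !c.isEmpty) = true) :
    ((rest.map List.tail).map List.length).sum < (rest.map List.length).sum := by
  induction rest with
  | nil => simp at h
  | cons a t ih =>
    simp only [List.any_cons, Bool.or_eq_true] at h
    simp only [List.map_cons, List.sum_cons]
    rcases h with h | h
    · have ha : a.tail.length < a.length := by
        cases a with
        | nil => simp at h
        | cons x xs => simp
      have := pvTailSum_le t
      omega
    · have := ih h
      have : a.tail.length ≤ a.length := by cases a <;> simp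
      omega

-- a row (one next() per iterator, sentinel entries dropped) is nonempty iff some grid still has entries (cited by decreasing_by)
theorem pvRowAny (rest : List (List String)) :
    rest.filterMap List.head? ≠ [] ↔ rest.any (fun c => !c.isEmpty) = true := by
  induction rest with
  | nil => simp
  | cons a t ih => cases a <;> simp [ih]

def altLines (rest : List (List String)) (spacing : String) : List String :=
  if h : rest.filterMap List.head? ≠ [] then
    PySem.Str.join spacing (rest.filterMap List.head?) ::
      altLines (rest.map List.tail) spacing
  else []
termination_by (rest.map List.length).sum
decreasing_by simpa using pvTailSum_lt rest ((pvRowAny rest).mp h)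

def combineChars_alt (chars : List (List String)) (spacing : String) : String :=
  PySem.Str.join "\n" (altLines chars spacing)

-- ===== PRECONDITION & SPEC =====
-- Pre_ excludes only chars = [], where Python A raises ValueError (max() of an empty sequence).
def Pre_combineChars (chars : List (List String)) (spacing : String) : Prop := chars ≠ []
instance (chars : List (List String)) (spacing : String) : Decidable (Pre_combineChars chars spacing) := by unfold Pre_combineChars; infer_instance
def pvWitness_combineChars : List (List String) × String := ([["ab", "c"], ["d"]], " ")

def Spec_combineChars (chars : List (List String)) (spacing : String) (out : String) : Prop := out = combineChars_alt chars spacing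
instance (chars : List (List String)) (spacing : String) (out : String) : Decidable (Spec_combineChars chars spacing out) := by unfold Spec_combineChars; infer_instance

-- ===== CLAIM (what is proved, stated in full; the proofs are below) =====
def Claim_equal_combineChars : Prop := ∀ (chars : List (List String)) (spacing : String), Dom_combineChars chars spacing → Pre_combineChars chars spacing → Spec_combineChars chars spacing (combineChars chars spacing)

-- ===== LEMMAS AND PROOFS =====

-- max([...]) realised as a foldl over Nat
theorem pvMax?_getD (l : List Nat) : l.max?.getD 0 = l.foldl max 0 := by
  cases l with
  | nil => simp
  | cons a t => rw [List.max?_cons']; rfl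

theorem pvFoldlMax_out (l : List Nat) (b : Nat) : l.foldl max b = max b (l.foldl max 0) := by
  induction l generalizing b with
  | nil => simp
  | cons a t ih =>
    simp only [List.foldl_cons]
    rw [ih (max b a), ih (max 0 a)]
    simp only [Nat.max_def]
    split_ifs <;> omega

-- nonempty list test as a length bound
theorem pvNE (a : List String) : ((!a.isEmpty) = true) = (0 < a.length) := by
  cases a <;> simp

-- 0 < max length ↔ some grid nonempty
theorem pvAnyPos (chars : List (List String)) :
    chars.any (fun c => !c.isEmpty) = true ↔ 0 < (chars.map (fun x => x.length)).foldl max 0 := by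
  induction chars with
  | nil => simp
  | cons a t ih =>
    rw [List.any_cons, List.map_cons, List.foldl_cons, pvFoldlMax_out]
    simp only [Bool.or_eq_true, pvNE, ih, lt_max_iff]
    omega

-- max length of the tails = max length - 1
theorem pvMaxTail (chars : List (List String)) :
    ((chars.map List.tail).map (fun x => x.length)).foldl max 0
      = (chars.map (fun x => x.length)).foldl max 0 - 1 := by
  induction chars with
  | nil => simp
  | cons a t ih =>
    simp only [List.map_cons, List.foldl_cons]
    rw [pvFoldlMax_out, pvFoldlMax_out (t.map (fun x => x.length)), ih]
    have ht : a.tail.length = a.length - 1 := by cases a <;> simp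
    rw [ht]
    simp only [Nat.max_comm 0, Nat.max_zero]
    exact Nat.sub_max_sub_right a.length _ 1

-- inner loop of A = filterMap of the i-th entries
theorem pvInner (chars : List (List String)) (i : Nat) (acc : List String) :
    chars.foldl (fun line c => if c.length > i then line ++ [c.getD i ""] else line) acc
      = acc ++ chars.filterMap (fun c => getElem? c i) := by
  induction chars generalizing acc with
  | nil => simp
  | cons a t ih =>
    simp only [List.foldl_cons, List.filterMap_cons]
    by_cases h : a.length > i
    · rw [if_pos h, ih]
      have hg : getElem? a i = some (a.getD i "") := by
        rw [List.getElem?_eq_getElem h]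
        simp [List.getD, List.getElem?_eq_getElem h]
      rw [hg]
      simp
    · rw [if_neg h, ih]
      have hg : getElem? a i = none := List.getElem?_eq_none (by omega)
      rw [hg]

-- outer loop of A = map over the range
theorem pvOuter {α β : Type} (l : List α) (f : α → β) (acc : List β) :
    l.foldl (fun a x => a ++ [f x]) acc = acc ++ l.map f := by
  induction l generalizing acc with
  | nil => simp
  | cons a t ih => simp [ih]

-- B's peeling loop produces exactly A's rows
theorem pvAlt (n : Nat) (chars : List (List String)) (spacing : String)
    (hn : (chars.map (fun x => x.length)).foldl max 0 = n) :
    altLines chars spacing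
      = (List.range n).map (fun i => PySem.Str.join spacing (chars.filterMap (fun c => getElem? c i))) := by
  induction n generalizing chars with
  | zero =>
    rw [altLines.eq_def]
    have h0 : ¬ chars.filterMap List.head? ≠ [] := by
      rw [pvRowAny, pvAnyPos]; omega
    simp [h0]
  | succ m ih =>
    rw [altLines.eq_def]
    have hrow : chars.filterMap List.head? ≠ [] := by
      rw [pvRowAny, pvAnyPos]; omega
    rw [dif_pos hrow]
    have htail : ((chars.map List.tail).map (fun x => x.length)).foldl max 0 = m := by
      rw [pvMaxTail, hn]
      omega
    rw [ih (chars.map List.tail) htail]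
    rw [List.range_succ_eq_map]
    simp only [List.map_cons, List.map_map]
    congr 1
    · congr 1
      apply List.filterMap_congr
      intro c _
      exact List.head?_eq_getElem?
    · apply List.map_congr_left
      intro i _
      simp only [Function.comp_apply]
      congr 1
      rw [List.filterMap_map]
      apply List.filterMap_congr
      intro c _
      simp only [Function.comp_apply, Nat.succ_eq_add_one]
      exact List.getElem?_tail

-- ===== VERDICT (by name: the statement is the Claim_ definition above) =====
theorem combineChars_spec : Claim_equal_combineChars := by
  intro chars spacing _ _
  unfold Spec_combineChars combineChars combineChars_alt
  dsimp only
  rw [pvMax?_getD, pvAlt ((chars.map (fun x => x.length)).foldl max 0) chars spacing rfl]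
  congr 1
  rw [pvOuter]
  simp only [List.nil_append]
  apply List.map_congr_left
  intro i _
  rw [pvInner]
  simp
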